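-- pv_equiv track=rewrite | github.com/XhashimX/video_rating_app | tikmon/per/per.py | find_new_links
-- ===== SOURCE A (Python) =====
-- REPEAT_THRESHOLD = 3
--
-- def find_new_links(fetched, existing):
--     """
--     إيجاد الروابط الجديدة بمقارنة القائمة الحالية بالسابقة.
--     الشرط الذكي: إذا وجدنا REPEAT_THRESHOLD روابط مكررة (بنفس الترتيب)، نتوقف.
--     """
--     new_links = []
--     repeat_count = 0
--     for url in fetched:
--         if url in existing:
--             repeat_count += 1
--             if repeat_count >= REPEAT_THRESHOLD:
--                 break
--         else:
--             repeat_count = 0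
--             new_links.append(url)
--     return new_links
-- ===== SOURCE B (Python) =====
-- REPEAT_THRESHOLD = 3
--
-- def find_new_links(fetched, existing):
--     ex = set(existing)
--     flags = [u in ex for u in fetched]
--     # stop point = end of the first window of REPEAT_THRESHOLD consecutive known links
--     cutoff = len(fetched)
--     for i, win in enumerate(zip(flags, flags[1:], flags[2:])):
--         if all(win):
--             cutoff = i + REPEAT_THRESHOLD - 1
--             break
--     return [u for u in fetched[:cutoff] if u not in ex]
-- ===== Notes on version B (the rewrite author's own statement) =====
-- stated objective: alternative
-- what changed: B has no consecutive-duplicate counter: it precomputes a boolean flags list, finds the stop point as the end of the first sliding window of three consecutive True flags (zip of three shifted lists), then filters the prefix; A fuses counting, breaking and accumulation in one loop.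
import Mathlib
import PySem

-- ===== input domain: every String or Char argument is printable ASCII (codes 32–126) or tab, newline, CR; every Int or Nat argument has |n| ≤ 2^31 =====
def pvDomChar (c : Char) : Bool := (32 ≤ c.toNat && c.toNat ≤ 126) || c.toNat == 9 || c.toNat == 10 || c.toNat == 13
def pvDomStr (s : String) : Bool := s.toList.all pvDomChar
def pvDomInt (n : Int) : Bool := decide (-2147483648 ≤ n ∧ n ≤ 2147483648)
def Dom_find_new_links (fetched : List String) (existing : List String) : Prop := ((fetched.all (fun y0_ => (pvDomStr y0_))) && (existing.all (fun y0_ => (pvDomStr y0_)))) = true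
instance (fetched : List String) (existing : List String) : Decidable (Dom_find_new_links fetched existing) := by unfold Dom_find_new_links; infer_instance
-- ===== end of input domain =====

-- B replaces A's fused counting loop by window detection: a sliding triple over a precomputed
-- flags list locates the first run of 3 consecutive known links, then a filter over the prefix
-- collects the result; same output as A.

-- ===== PORT A =====
-- loop: accumulates new_links while counting consecutive duplicates; break at threshold 3
def find_new_links_loop (existing : List String) : List String → List String → Nat → List String
  | [], new_links, _ => new_links
  | url :: rest, new_links, repeat_count =>
    if existing.contains url then
      if repeat_count + 1 ≥ 3 then new_links
      else find_new_links_loop existing rest new_links (repeat_count + 1)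
    else find_new_links_loop existing rest (new_links ++ [url]) 0

def find_new_links (fetched : List String) (existing : List String) : List String :=
  find_new_links_loop existing fetched [] 0

-- ===== PORT B =====
-- Source B's window scan: zip(flags, flags[1:], flags[2:]) — first all-True triple ends at index i+2;
-- if none (including lists shorter than 3), the default cutoff len(fetched) results.
def fnl_cut : List Bool → Nat
  | a :: b :: c :: rest => if a && b && c then 2 else 1 + fnl_cut (b :: c :: rest)
  | l => l.length

def find_new_links_alt (fetched : List String) (existing : List String) : List String :=
  let ex := PySem.Set.ofList existing
  let flags := fetched.map (fun u => PySem.Set.contains ex u)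
  let cutoff := fnl_cut flags
  (fetched.take cutoff).filter (fun u => !(PySem.Set.contains ex u))

-- ===== PRECONDITION & SPEC =====
def Spec_find_new_links (fetched : List String) (existing : List String) (out : List String) : Prop := out = find_new_links_alt fetched existing
instance (fetched : List String) (existing : List String) (out : List String) : Decidable (Spec_find_new_links fetched existing out) := by unfold Spec_find_new_links; infer_instance

-- ===== CLAIM (what is proved, stated in full; the proofs are below) =====
def Claim_equal_find_new_links : Prop := ∀ (fetched : List String) (existing : List String), Dom_find_new_links fetched existing → Spec_find_new_links fetched existing (find_new_links fetched existing)

-- ===== LEMMAS AND PROOFS =====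

-- proof-only helper: A's break position as a counter-based recursion over the remaining list
def fnl_cutoff (ex : PySem.Set String) : List String → Nat → Nat → Nat
  | [], i, _ => i
  | url :: rest, i, run =>
    if PySem.Set.contains ex url then
      if run + 1 ≥ 3 then i
      else fnl_cutoff ex rest (i + 1) (run + 1)
    else fnl_cutoff ex rest (i + 1) 0

theorem fnl_cutoff_shift (ex : PySem.Set String) (l : List String) (i run : Nat) :
    fnl_cutoff ex l i run = i + fnl_cutoff ex l 0 run := by
  induction l generalizing i run with
  | nil => simp [fnl_cutoff]
  | cons u rest ih =>
    by_cases hb : PySem.Set.contains ex u = true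
    · by_cases h3 : run + 1 ≥ 3
      · simp only [fnl_cutoff]
        rw [if_pos hb, if_pos hb, if_pos h3, if_pos h3]
        omega
      · simp only [fnl_cutoff]
        rw [if_pos hb, if_pos hb, if_neg h3, if_neg h3, ih, ih 1, Nat.add_assoc]
    · simp only [fnl_cutoff]
      rw [if_neg hb, if_neg hb, ih, ih 1, Nat.add_assoc]

theorem fnl_contains_ofList (existing : List String) (u : String) :
    PySem.Set.contains (PySem.Set.ofList existing) u = existing.contains u := by
  simp

theorem fnl_main (existing l acc : List String) (rc : Nat) :
    find_new_links_loop existing l acc rc =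
      acc ++ (l.take (fnl_cutoff (PySem.Set.ofList existing) l 0 rc)).filter
        (fun u => !(PySem.Set.contains (PySem.Set.ofList existing) u)) := by
  induction l generalizing acc rc with
  | nil => simp [find_new_links_loop, fnl_cutoff]
  | cons u rest ih =>
    by_cases hb : existing.contains u = true
    · have hm : u ∈ existing := by simpa using hb
      have hc : PySem.Set.contains (PySem.Set.ofList existing) u = true := by
        rw [fnl_contains_ofList]; exact hb
      by_cases h3 : rc + 1 ≥ 3
      · simp only [find_new_links_loop, fnl_cutoff]
        rw [if_pos hb, if_pos hc, if_pos h3, if_pos h3]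
        simp
      · simp only [find_new_links_loop, fnl_cutoff]
        rw [if_pos hb, if_pos hc, if_neg h3, if_neg h3, ih,
          fnl_cutoff_shift _ _ 1, Nat.add_comm 1, List.take_succ_cons, List.filter_cons]
        simp [hm]
    · have hm : u ∉ existing := by simpa using hb
      have hc : PySem.Set.contains (PySem.Set.ofList existing) u = false := by
        rw [fnl_contains_ofList]; simpa using hb
      simp only [find_new_links_loop, fnl_cutoff]
      rw [if_neg hb, if_neg (by simpa using hm), ih,
        fnl_cutoff_shift _ _ 1, Nat.add_comm 1, List.take_succ_cons, List.filter_cons]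
      simp [hm]

theorem fnl_cut_ge (l : List Bool) : min l.length 2 ≤ fnl_cut l := by
  match l with
  | [] => simp [fnl_cut]
  | [a] => simp [fnl_cut]
  | [a, b] => simp [fnl_cut]
  | a :: b :: c :: rest =>
    have := fnl_cut_ge (b :: c :: rest)
    simp only [fnl_cut]
    split <;> simp_all <;> try omega

theorem fnl_cut_false_cons (x : List Bool) : fnl_cut (false :: x) = 1 + fnl_cut x := by
  match x with
  | [] => simp [fnl_cut]
  | [a] => simp [fnl_cut]
  | b :: c :: rest => simp [fnl_cut]

theorem fnl_cut_tf (x : List Bool) : fnl_cut (true :: false :: x) = 2 + fnl_cut x := by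
  match x with
  | [] => simp [fnl_cut]
  | c :: rest => simp [fnl_cut, fnl_cut_false_cons]; omega

-- A's counter-based break position equals the window scan, with rc pending trues credited
theorem fnl_bridge (ex : PySem.Set String) (l : List String) (rc : Nat) (hrc : rc ≤ 2) :
    fnl_cutoff ex l 0 rc =
      fnl_cut (List.replicate rc true ++ l.map (fun u => PySem.Set.contains ex u)) - rc := by
  induction l generalizing rc with
  | nil =>
    interval_cases rc <;> simp [fnl_cutoff, fnl_cut]
  | cons u rest ih =>
    by_cases hm : u ∈ ex
    · have hb : PySem.Set.contains ex u = true := by simp [hm]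
      by_cases h3 : rc + 1 ≥ 3
      · have hrc2 : rc = 2 := by omega
        subst hrc2
        simp [fnl_cutoff, hm, fnl_cut]
      · have h1 : rc + 1 ≤ 2 := by omega
        have heq : List.replicate rc true ++ (u :: rest).map (fun u => PySem.Set.contains ex u)
            = List.replicate (rc + 1) true ++ rest.map (fun u => PySem.Set.contains ex u) := by
          simp [hm, List.replicate_succ', List.append_assoc]
        simp only [fnl_cutoff]
        rw [if_pos hb, if_neg h3, fnl_cutoff_shift, ih _ h1, heq]
        have hge := fnl_cut_ge (List.replicate (rc + 1) true ++
          rest.map (fun u => PySem.Set.contains ex u))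
        have hlen : (List.replicate (rc + 1) true ++
            rest.map (fun u => PySem.Set.contains ex u)).length ≥ rc + 1 := by
          simp
        omega
    · have hb : ¬ PySem.Set.contains ex u = true := by simp [hm]
      simp only [fnl_cutoff]
      rw [if_neg hb, fnl_cutoff_shift, ih 0 (by omega)]
      have hfc : fnl_cut (List.replicate rc true ++ (u :: rest).map (fun u => PySem.Set.contains ex u))
          = rc + 1 + fnl_cut (rest.map (fun u => PySem.Set.contains ex u)) := by
        interval_cases rc
        · simp [hm, fnl_cut_false_cons]
        · simp [hm, fnl_cut_tf]
        · have hf : PySem.Set.contains ex u = false := by simp [hm]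
          simp only [List.map_cons, hf, List.replicate, List.cons_append, List.nil_append]
          rw [show fnl_cut (true :: true :: false ::
              rest.map (fun u => PySem.Set.contains ex u))
            = 1 + fnl_cut (true :: false :: rest.map (fun u => PySem.Set.contains ex u)) from by
              simp [fnl_cut], fnl_cut_tf]
          omega
      simp only [hfc, List.replicate, List.nil_append]
      omega

-- ===== VERDICT (by name: the statement is the Claim_ definition above) =====
theorem find_new_links_spec : Claim_equal_find_new_links := by
  intro fetched existing _
  unfold Spec_find_new_links find_new_links find_new_links_alt
  have h := fnl_main existing fetched [] 0
  have hb := fnl_bridge (PySem.Set.ofList existing) fetched 0 (by omega)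
  simp only [List.replicate, List.nil_append, Nat.sub_zero] at hb
  simp [h, hb]
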